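-- pv_equiv track=rewrite | github.com/mbusc1/Python-Projects | q4solution/q4solution.py | drop_last
-- ===== SOURCE A (Python) =====
-- def drop_last(iterable,n):
--     i = iter(iterable)
--     try:
--         window = [next(i) for _ in range(n)]
--         while True:
--             window.append(next(i))
--             yield window.pop(0)
--     except StopIteration:
--         return
-- ===== SOURCE B (Python) =====
-- def drop_last(iterable, n):
--     data = list(iterable)
--     keep = max(len(data) - n, 0)
--     yield from data[:keep]
-- ===== Notes on version B (the rewrite author's own statement) =====
-- stated objective: faster
-- what changed: Replaces the streaming n-element sliding window (append + pop(0) per yielded item) with one closed-form slice data[:max(len(data)-n, 0)], removing the O(n) list shift per element.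
import Mathlib
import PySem

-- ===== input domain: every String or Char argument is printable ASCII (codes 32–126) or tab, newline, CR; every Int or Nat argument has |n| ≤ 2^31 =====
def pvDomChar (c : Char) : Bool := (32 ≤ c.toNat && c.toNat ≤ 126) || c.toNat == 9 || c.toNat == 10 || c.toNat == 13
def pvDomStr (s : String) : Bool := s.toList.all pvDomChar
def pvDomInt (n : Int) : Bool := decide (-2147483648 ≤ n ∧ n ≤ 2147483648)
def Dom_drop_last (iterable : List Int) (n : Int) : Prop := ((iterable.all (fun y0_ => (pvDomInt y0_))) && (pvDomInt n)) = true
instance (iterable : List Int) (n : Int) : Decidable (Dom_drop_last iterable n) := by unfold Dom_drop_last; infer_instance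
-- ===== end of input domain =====

-- B replaces A's sliding-window generator by one closed-form slice; same yielded sequence.

-- ===== PORT A =====
-- A's while-loop: window.append(next(i)); yield window.pop(0) — one yield per remaining element.
def dropLastLoopA : List Int → List Int → List Int
  | _, [] => []                -- next(i) raises StopIteration → return
  | window, x :: xs =>
    match window ++ [x] with   -- window.append(x); then pop(0) and yield it
    | y :: ys => y :: dropLastLoopA ys xs
    | [] => []                 -- unreachable: window ++ [x] is nonempty

def drop_last (iterable : List Int) (n : Int) : List Int :=
  -- window = [next(i) for _ in range(n)]: raises (→ yields nothing) if fewer than n elements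
  let k := n.toNat             -- range(n) has n.toNat steps (empty for n ≤ 0)
  if k ≤ iterable.length then dropLastLoopA (iterable.take k) (iterable.drop k)
  else []

-- ===== PORT B =====
def drop_last_alt (iterable : List Int) (n : Int) : List Int :=
  let data := iterable
  let keep := max ((data.length : Int) - n) 0
  PySem.List.slice data none (some keep)   -- data[:keep]

-- ===== PRECONDITION & SPEC =====
def Spec_drop_last (iterable : List Int) (n : Int) (out : List Int) : Prop := out = drop_last_alt iterable n
instance (iterable : List Int) (n : Int) (out : List Int) : Decidable (Spec_drop_last iterable n out) := by unfold Spec_drop_last; infer_instance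

-- ===== CLAIM (what is proved, stated in full; the proofs are below) =====
def Claim_equal_drop_last : Prop := ∀ (iterable : List Int) (n : Int), Dom_drop_last iterable n → Spec_drop_last iterable n (drop_last iterable n)

-- ===== LEMMAS AND PROOFS =====

-- A's loop yields the first rest.length elements of window ++ rest.
theorem dropLastLoopA_eq (rest window : List Int) :
    dropLastLoopA window rest = (window ++ rest).take rest.length := by
  induction rest generalizing window with
  | nil => simp [dropLastLoopA]
  | cons x xs ih =>
    have hne : window ++ [x] ≠ [] := by simp
    match hw : window ++ [x] with
    | [] => exact absurd hw hne
    | y :: ys =>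
      have : window ++ x :: xs = y :: (ys ++ xs) := by
        have : (window ++ [x]) ++ xs = y :: ys ++ xs := by rw [hw]
        simpa using this
      simp [dropLastLoopA, hw, ih, this]

theorem drop_last_alt_eq (iterable : List Int) (n : Int) :
    drop_last_alt iterable n = iterable.take (iterable.length - n.toNat) := by
  have hk : max ((iterable.length : Int) - n) 0 = ((((iterable.length : Int) - n).toNat : Nat) : Int) := by
    omega
  simp only [drop_last_alt, hk, PySem.List.slice_to_natCast]
  by_cases h : 0 ≤ n
  · congr 1
    omega
  · rw [List.take_of_length_le (by omega), List.take_of_length_le (by omega)]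

-- ===== VERDICT (by name: the statement is the Claim_ definition above) =====
theorem drop_last_spec : Claim_equal_drop_last := by
  intro iterable n _
  unfold Spec_drop_last drop_last
  rw [drop_last_alt_eq]
  simp only []
  by_cases h : n.toNat ≤ iterable.length
  · simp [h, dropLastLoopA_eq, List.take_append_drop]
  · simp [h]
    omega
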